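-- pv_equiv track=rewrite | github.com/claudiojacobo/resolvent-degree | Demos/helper_functions.py | prime_powers_up_to
-- ===== SOURCE A (Python) =====
-- def primes_up_to(k):
--     '''
--     returns an ascending list of all primes up through k
--     '''
--     primes = [2]
--     for i in range(3,k):
--         for p in primes:
--             if i%p == 0: break
--         else:
--             primes.append(i)
--     return primes
--
-- def prime_powers_up_to(k, as_pairs=False):
--     '''
--     returns an ascending list of all prime powers up through k
--     '''
--     prime_powers = []
--     for p in primes_up_to(k):
--         e = 1
--         q = p**e
--         while q <= k:
--             if as_pairs:
--                 prime_powers.append((p, e))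
--             else:
--                 prime_powers.append(q)
--             e += 1
--             q *= p
--     if as_pairs:
--         return sorted(prime_powers, key=lambda x: x[0]**x[1])
--     return sorted(prime_powers)
-- ===== SOURCE B (Python) =====
-- def _is_prime(n):
--     # deterministic trial division by 2,3,4,... up to the integer square root
--     d = 2
--     while d * d <= n:
--         if n % d == 0:
--             return False
--         d += 1
--     return True
--
--
-- def prime_powers_up_to(k, as_pairs=False):
--     '''
--     returns an ascending list of all prime powers up through k
--     (primes are taken as 2 plus the primes in [3, k), matching the original)
--     '''
--     primes = [2] + [i for i in range(3, k) if _is_prime(i)]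
--     out = []
--     for p in primes:
--         q, e = p, 1
--         while q <= k:
--             out.append((p, e) if as_pairs else q)
--             q, e = q * p, e + 1
--     if as_pairs:
--         out.sort(key=lambda t: t[0] ** t[1])
--     else:
--         out.sort()
--     return out
-- ===== Notes on version B (the rewrite author's own statement) =====
-- stated objective: faster
-- what changed: B decides primality of each candidate independently by trial division up to its square root (and builds the prime list as a filter of the range), instead of A's scheme of scanning the whole ever-growing list of previously found primes for each candidate.
import Mathlib
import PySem

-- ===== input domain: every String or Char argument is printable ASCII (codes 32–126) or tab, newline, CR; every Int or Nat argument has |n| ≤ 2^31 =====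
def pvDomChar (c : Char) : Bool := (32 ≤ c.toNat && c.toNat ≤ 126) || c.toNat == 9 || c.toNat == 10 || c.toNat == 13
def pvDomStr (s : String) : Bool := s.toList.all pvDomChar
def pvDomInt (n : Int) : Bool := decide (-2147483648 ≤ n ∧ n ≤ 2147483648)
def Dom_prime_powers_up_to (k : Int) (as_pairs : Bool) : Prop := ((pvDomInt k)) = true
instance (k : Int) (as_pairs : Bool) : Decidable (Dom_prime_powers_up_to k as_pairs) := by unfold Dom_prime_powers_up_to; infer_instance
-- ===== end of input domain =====

-- B replaces A's trial division by the ever-growing list of previously found primes with an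
-- independent trial division up to the square root of each candidate (asymptotically faster).
-- Both ports follow the as_pairs=False path; as_pairs=True (a list of pairs, outside List Int)
-- is excluded by Pre_.

-- ===== PORT A =====
-- primes_up_to: primes = [2]; for i in range(3,k): if no p in primes divides i, append i
def pvPrimesA (k : Int) : List Int :=
  (PySem.List.pyRange 3 k 1).foldl
    (fun primes i =>
      if primes.any (fun p => PySem.Int.mod i p == 0) then primes else primes ++ [i])
    [2]

-- the inner while loop of A: e = 1; q = p**e; while q <= k: append q; e += 1; q *= p
-- fuel: q at least doubles each step (p ≥ 2), so k.toNat+1 steps always suffice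
def pvPowersA (k p : Int) : Int → Int → Nat → List Int
  | _, _, 0 => []
  | e, q, n+1 => if q ≤ k then q :: pvPowersA k p (e+1) (q*p) n else []

def prime_powers_up_to (k : Int) (as_pairs : Bool) : List Int :=
  PySem.List.sorted
    ((pvPrimesA k).foldl (fun acc p => acc ++ pvPowersA k p 1 (p ^ (1:Nat)) (k.toNat + 1)) [])
    id false

-- ===== PORT B =====
-- _is_prime: d = 2; while d*d <= n: if n % d == 0: return False; d += 1; return True
-- (on the candidates used, n ≥ 3, so Python's ints and % agree with Nat arithmetic)
def pvIsPrimeB (n d : Nat) : Bool :=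
  if _h : d * d ≤ n then (if n % d == 0 then false else pvIsPrimeB n (d+1)) else true
  termination_by n + 1 - d
  decreasing_by
    have : d ≤ d * d ∨ d = 0 := by
      rcases Nat.eq_zero_or_pos d with h0 | h0
      · right; exact h0
      · left; exact Nat.le_mul_of_pos_left d h0
    omega

def pvIsPrime (i : Int) : Bool := pvIsPrimeB i.toNat 2

-- the inner while loop of B: q = p; while q <= k: append q; q *= p
-- (the exponent e of Source B is only used for the excluded as_pairs=True output; same fuel bound)
def pvPowersB (k p : Int) : Int → Nat → List Int
  | _, 0 => []
  | q, n+1 => if q ≤ k then q :: pvPowersB k p (q*p) n else []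

def prime_powers_up_to_alt (k : Int) (as_pairs : Bool) : List Int :=
  let primes := 2 :: ((PySem.List.pyRange 3 k 1).filter (fun i => pvIsPrime i))
  PySem.List.sorted
    (primes.foldl (fun acc p => acc ++ pvPowersB k p p (k.toNat + 1)) [])
    id false

-- ===== PRECONDITION & SPEC =====
-- Pre_ excludes as_pairs=True, on which the Python A returns a list of (prime, exponent)
-- pairs — not a value of the declared return type List Int.
def Pre_prime_powers_up_to (k : Int) (as_pairs : Bool) : Prop := as_pairs = false
instance (k : Int) (as_pairs : Bool) : Decidable (Pre_prime_powers_up_to k as_pairs) := by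
  unfold Pre_prime_powers_up_to; infer_instance

def pvWitness_prime_powers_up_to : Int × Bool := (10, false)

def Spec_prime_powers_up_to (k : Int) (as_pairs : Bool) (out : List Int) : Prop :=
  out = prime_powers_up_to_alt k as_pairs
instance (k : Int) (as_pairs : Bool) (out : List Int) : Decidable (Spec_prime_powers_up_to k as_pairs out) := by
  unfold Spec_prime_powers_up_to; infer_instance

-- ===== CLAIM (what is proved, stated in full; the proofs are below) =====
def Claim_equal_prime_powers_up_to : Prop :=
  ∀ (k : Int) (as_pairs : Bool), Dom_prime_powers_up_to k as_pairs →
    Pre_prime_powers_up_to k as_pairs →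
    Spec_prime_powers_up_to k as_pairs (prime_powers_up_to k as_pairs)

-- ===== LEMMAS AND PROOFS =====

-- B's loop tests exactly "no divisor e with d ≤ e and e*e ≤ n"
lemma pvIsPrimeB_iff (n d : Nat) :
    pvIsPrimeB n d = true ↔ ∀ e, d ≤ e → e * e ≤ n → ¬ e ∣ n := by
  fun_induction pvIsPrimeB n d with
  | case1 d h hdvd =>
      simp only [beq_iff_eq] at hdvd
      simp only [Bool.false_eq_true, false_iff]
      push Not
      exact ⟨d, le_refl d, h, Nat.dvd_of_mod_eq_zero hdvd⟩
  | case2 d h hdvd ih =>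
      simp only [beq_iff_eq] at hdvd
      rw [ih]
      constructor
      · intro H e hde he hdvd2
        rcases Nat.lt_or_ge d e with hlt | hge
        · exact H e hlt he hdvd2
        · have heq : e = d := by omega
          exact hdvd (Nat.mod_eq_zero_of_dvd (heq ▸ hdvd2))
      · intro H e hde he hd2
        exact H e (Nat.le_of_succ_le hde) he hd2
  | case3 d h =>
      simp only [true_iff]
      intro e hde he hdvd
      exact h (le_trans (Nat.mul_le_mul hde hde) he)

lemma pvIsPrimeB_prime {n : Nat} (hn : 2 ≤ n) : pvIsPrimeB n 2 = true ↔ Nat.Prime n := by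
  rw [pvIsPrimeB_iff]
  constructor
  · intro H
    by_contra hnp
    have hm : (Nat.minFac n).Prime := Nat.minFac_prime (by omega)
    have hsq : Nat.minFac n * Nat.minFac n ≤ n := by
      simpa [pow_two] using Nat.minFac_sq_le_self (by omega) hnp
    exact H (Nat.minFac n) hm.two_le hsq (Nat.minFac_dvd n)
  · intro hp e h2e hee hdvd
    rcases (hp.eq_one_or_self_of_dvd e hdvd) with h1 | h1
    · omega
    · have := hp.two_le
      subst h1
      nlinarith

lemma pvIsPrime_iff {p : Int} (hp : 2 ≤ p) : pvIsPrime p = true ↔ Nat.Prime p.toNat := by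
  unfold pvIsPrime
  exact pvIsPrimeB_prime (by omega)

-- the membership test of A over [2] ++ (primes found so far) is exactly non-primality
lemma anyA_eq (a : Int) (h3 : 3 ≤ a) :
    ((2 :: (PySem.List.pyRange 3 a 1).filter (fun i => pvIsPrime i)).any
        (fun p => PySem.Int.mod a p == 0)) = !pvIsPrime a := by
  have key : (∃ p ∈ 2 :: (PySem.List.pyRange 3 a 1).filter (fun i => pvIsPrime i),
      PySem.Int.mod a p = 0) ↔ ¬ Nat.Prime a.toNat := by
    constructor
    · rintro ⟨p, hp, hmod⟩
      have hdvd : p ∣ a := (PySem.Int.mod_eq_zero_iff_dvd a p).mp hmod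
      have hbound : 2 ≤ p ∧ p < a := by
        rcases List.mem_cons.mp hp with h | h
        · omega
        · have h1 := List.mem_filter.mp h
          have h2 := PySem.List.mem_pyRange_one.mp h1.1
          omega
      intro hP
      have hnat : p.toNat ∣ a.toNat := by
        have hcast : ((p.toNat : Int)) ∣ ((a.toNat : Int)) := by
          rwa [Int.toNat_of_nonneg (by omega), Int.toNat_of_nonneg (by omega)]
        exact_mod_cast hcast
      rcases hP.eq_one_or_self_of_dvd p.toNat hnat with h1 | h1 <;> omega
    · intro hnp
      set m := Nat.minFac a.toNat with hm
      have hmp : m.Prime := Nat.minFac_prime (by omega)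
      have hmd : m ∣ a.toNat := Nat.minFac_dvd a.toNat
      have hsq : m * m ≤ a.toNat := by
        simpa [pow_two] using Nat.minFac_sq_le_self (by omega) hnp
      have hm2 : 2 ≤ m := hmp.two_le
      have hmlt : m < a.toNat := by nlinarith
      have hdvdInt : (m : Int) ∣ a := by
        have hc : ((m : Int)) ∣ ((a.toNat : Int)) := Int.natCast_dvd_natCast.mpr hmd
        rwa [Int.toNat_of_nonneg (by omega)] at hc
      rcases Nat.lt_or_ge m 3 with hm3 | hm3
      · refine ⟨2, List.mem_cons_self .., ?_⟩
        rw [PySem.Int.mod_eq_zero_iff_dvd]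
        have h2 : m = 2 := by omega
        rwa [h2] at hdvdInt
      · refine ⟨(m : Int), ?_, (PySem.Int.mod_eq_zero_iff_dvd a (m:Int)).mpr hdvdInt⟩
        apply List.mem_cons_of_mem
        apply List.mem_filter.mpr
        refine ⟨PySem.List.mem_pyRange_one.mpr ⟨by exact_mod_cast hm3, by omega⟩, ?_⟩
        rw [pvIsPrime_iff (by exact_mod_cast hm2)]
        simpa using hmp
  have hchar : pvIsPrime a = true ↔ Nat.Prime a.toNat := pvIsPrime_iff (by omega)
  cases hb : pvIsPrime a with
  | false =>
      simp only [Bool.not_false]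
      rw [List.any_eq_true]
      simp only [beq_iff_eq]
      exact key.mpr (fun hp => by rw [hchar.mpr hp] at hb; cases hb)
  | true =>
      simp only [Bool.not_true]
      rw [Bool.eq_false_iff]
      intro hany
      rw [List.any_eq_true] at hany
      simp only [beq_iff_eq] at hany
      exact (key.mp hany) (hchar.mp hb)

-- the fold of A keeps the invariant "2 :: primes found in [3, a)"
lemma foldA_inv (k : Int) :
    ∀ (m : Nat) (a : Int), 3 ≤ a → m = (k - a).toNat →
      (PySem.List.pyRange a k 1).foldl
          (fun primes i =>
            if primes.any (fun p => PySem.Int.mod i p == 0) then primes else primes ++ [i])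
          (2 :: (PySem.List.pyRange 3 a 1).filter (fun i => pvIsPrime i))
        = 2 :: (PySem.List.pyRange 3 (max a k) 1).filter (fun i => pvIsPrime i) := by
  intro m
  induction m with
  | zero =>
      intro a h3 hm
      have hka : k ≤ a := by omega
      rw [PySem.List.pyRange_one_eq_nil hka, max_eq_left hka]
      rfl
  | succ m ih =>
      intro a h3 hm
      have hak : a < k := by omega
      rw [PySem.List.pyRange_one_cons hak]
      rw [List.foldl_cons, anyA_eq a h3]
      have hstep :
          (if (!pvIsPrime a) = true
             then 2 :: (PySem.List.pyRange 3 a 1).filter (fun i => pvIsPrime i)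
             else (2 :: (PySem.List.pyRange 3 a 1).filter (fun i => pvIsPrime i)) ++ [a])
          = 2 :: (PySem.List.pyRange 3 (a+1) 1).filter (fun i => pvIsPrime i) := by
        rw [PySem.List.pyRange_one_succ_right (by omega), List.filter_append]
        cases hb : pvIsPrime a <;> simp [hb]
      rw [hstep]
      have := ih (a+1) (by omega) (by omega)
      rw [this, max_comm a k, max_comm (a+1) k]
      have : max k a = max k (a+1) := by omega
      rw [this]

lemma primesA_eq (k : Int) :
    pvPrimesA k = 2 :: (PySem.List.pyRange 3 k 1).filter (fun i => pvIsPrime i) := by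
  unfold pvPrimesA
  have h := foldA_inv k (k - 3).toNat 3 (le_refl 3) rfl
  rcases lt_or_ge 3 k with h3 | h3
  · rw [max_eq_right (le_of_lt h3)] at h
    simpa using h
  · rw [max_eq_left h3] at h
    rw [PySem.List.pyRange_one_eq_nil h3] at h ⊢
    simpa using h

-- the two inner while loops produce the same list (A additionally tracks the unused exponent)
lemma powers_eq (k p : Int) :
    ∀ (n : Nat) (e q : Int), pvPowersA k p e q n = pvPowersB k p q n := by
  intro n
  induction n with
  | zero => intro e q; rfl
  | succ n ih =>
      intro e q
      simp only [pvPowersA, pvPowersB]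
      split <;> simp [ih]

lemma powers_eq' (k p : Int) (n : Nat) :
    pvPowersA k p 1 (p ^ (1:Nat)) n = pvPowersB k p p n := by
  rw [pow_one]; exact powers_eq k p n 1 p

-- ===== VERDICT (by name: the statement is the Claim_ definition above) =====
theorem prime_powers_up_to_spec : Claim_equal_prime_powers_up_to := by
  intro k as_pairs _hdom _hpre
  unfold Spec_prime_powers_up_to prime_powers_up_to prime_powers_up_to_alt
  rw [primesA_eq k]
  simp only [powers_eq']
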